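-- pv_equiv track=rewrite | github.com/ppgorecki/csvmanip | csvmanip.py | sortlabels
-- ===== SOURCE A (Python) =====
-- def sortlabels(labs):
--
--     dest = []
--     for l in labs:
--         if ':' in l:
--             pref,suf = l.rsplit(':',1)
--
--             for gr in dest:
--                 if gr[0] == suf:
--                     gr.append(l)
--                     break
--             else:
--                 dest.append([suf,l])
--         else:
--             dest.append([l,l])
--
--     return [ l for gr in dest for l in gr[1:] ]
-- ===== SOURCE B (Python) =====
-- def sortlabels(labs):
--     # Pass 1: assign each label a numeric group id (first-seen suffix keys a group;
--     # a plain label always opens a new group but registers its key only if unseen).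
--     # Pass 2: counting sort by group id — count group sizes, prefix-sum the counts
--     # into start offsets, and place every label directly at its output slot.
--     first = {}
--     gid = []
--     n = 0
--     for l in labs:
--         if ':' in l:
--             suf = l.rsplit(':', 1)[1]
--             g = first.get(suf)
--             if g is None:
--                 g = n
--                 first[suf] = g
--                 n += 1
--             gid.append(g)
--         else:
--             first.setdefault(l, n)
--             gid.append(n)
--             n += 1
--     count = [0] * n
--     for k in gid:
--         count[k] += 1
--     pos = []
--     s = 0
--     for c in count:
--         pos.append(s)
--         s += c
--     out = [''] * len(labs)
--     for l, k in zip(labs, gid):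
--         out[pos[k]] = l
--         pos[k] += 1
--     return out
-- ===== Notes on version B (the rewrite author's own statement) =====
-- stated objective: alternative
-- what changed: B never builds or mutates A's list of group records: one pass assigns each label a numeric group id via a key-to-id dict and a counter, then a counting sort by group id (size counts, prefix-sum offsets, direct placement) produces the output, so A's inner first-match scan and in-place group appends disappear.
import Mathlib
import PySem

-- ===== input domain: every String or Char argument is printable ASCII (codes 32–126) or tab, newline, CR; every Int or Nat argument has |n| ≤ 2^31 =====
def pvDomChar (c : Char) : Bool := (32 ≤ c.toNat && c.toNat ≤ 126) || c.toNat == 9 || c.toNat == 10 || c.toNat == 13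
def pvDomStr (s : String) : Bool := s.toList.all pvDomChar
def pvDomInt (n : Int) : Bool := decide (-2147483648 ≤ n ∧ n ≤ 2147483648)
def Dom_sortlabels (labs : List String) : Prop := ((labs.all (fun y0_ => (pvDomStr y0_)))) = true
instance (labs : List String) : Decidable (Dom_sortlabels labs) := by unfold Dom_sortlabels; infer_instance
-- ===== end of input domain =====

-- B replaces A's mutated list of group records by a one-pass numeric group-id labeling
-- (key→id dict + counter) followed by group-by-group emission (objective: alternative).


-- shared helper: `l.rsplit(':', 1)[1]` — the part of `l` after its last ':' (hand port of
-- rsplit, exact here: single-character separator, maxsplit=1, only the suffix piece is used,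
-- and both Pythons evaluate it only when ':' occurs in `l`).
def pySufAfterLastColon (l : String) : String :=
  String.ofList ((l.toList.reverse.takeWhile (fun c => c ≠ ':')).reverse)

-- ===== PORT A =====
-- the inner `for gr in dest: … break / else:` scan of A
def aScan (dest : List (List String)) (suf l : String) : List (List String) :=
  match dest with
  | [] => [[suf, l]]
  | gr :: rest =>
      if PySem.List.pyGet? gr 0 = some suf then (gr ++ [l]) :: rest
      else gr :: aScan rest suf l

def aStep (dest : List (List String)) (l : String) : List (List String) :=
  if l.toList.contains ':' then aScan dest (pySufAfterLastColon l) l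
  else dest ++ [[l, l]]

def sortlabels (labs : List String) : List String :=
  (labs.foldl aStep []).flatMap (fun gr => PySem.List.slice gr (some 1) none)

-- ===== PORT B =====
-- pass 1 of Source B: (first, gid, n) — key→group-id dict, per-label group ids, group counter
def bStep (st : PySem.Dict String Nat × List Nat × Nat) (l : String) :
    PySem.Dict String Nat × List Nat × Nat :=
  let first := st.1
  let gid := st.2.1
  let n := st.2.2
  if l.toList.contains ':' then
    let suf := pySufAfterLastColon l
    match first.get? suf with
    | some g => (first, gid ++ [g], n)
    | none => (first.insert suf n, gid ++ [n], n + 1)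
  else
    (first.setdefault l n, gid ++ [n], n + 1)

-- pass 2 of Source B: counting sort — `count[k] += 1`, the `pos`/`s` prefix-sum loop, and the
-- placement loop `out[pos[k]] = l; pos[k] += 1` (list indexing/assignment at the always
-- in-range Nat index k / pos[k] is ported as getD/set/modify, exact here since 0 ≤ index < length)
def sortlabels_alt (labs : List String) : List String :=
  let st := labs.foldl bStep (PySem.Dict.empty, [], 0)
  let gid := st.2.1
  let n := st.2.2
  let count := gid.foldl (fun c k => c.modify k (fun v => v + 1)) (List.replicate n 0)
  let pos := (count.foldl (fun st c => (st.1 ++ [st.2], st.2 + c)) (([] : List Nat), 0)).1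
  ((labs.zip gid).foldl
    (fun st p => (st.1.set (st.2.getD p.2 0) p.1, st.2.modify p.2 (fun v => v + 1)))
    (List.replicate labs.length "", pos)).1

-- ===== PRECONDITION & SPEC =====
def Spec_sortlabels (labs : List String) (out : List String) : Prop := out = sortlabels_alt labs
instance (labs : List String) (out : List String) : Decidable (Spec_sortlabels labs out) := by unfold Spec_sortlabels; infer_instance

-- ===== CLAIM (what is proved, stated in full; the proofs are below) =====
def Claim_equal_sortlabels : Prop := ∀ (labs : List String), Dom_sortlabels labs → Spec_sortlabels labs (sortlabels labs)

-- ===== LEMMAS AND PROOFS =====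

-- B's groups, as lists: group g collects the processed labels labeled g
def groupsOf (P : List String) (gs : List Nat) (n : Nat) : List (List String) :=
  (List.range n).map (fun g => ((P.zip gs).filter (fun p => p.2 == g)).map Prod.fst)

def grKey (k : String) (gr : List String) : Bool := PySem.List.pyGet? gr 0 = some k

theorem grKey_cons (k a : String) (t : List String) :
    grKey k (a :: t) = decide (a = k) := by
  simp [grKey]

theorem modify_zero_cons {a : Type} (f : a -> a) (x : a) (t : List a) :
    (x :: t).modify 0 f = f x :: t := rfl

theorem modify_succ_cons {a : Type} (f : a -> a) (x : a) (t : List a) (n : Nat) :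
    (x :: t).modify (n + 1) f = x :: t.modify n f := rfl

-- A's scan, characterised by the first index whose group key matches
theorem aScan_eq (dest : List (List String)) (suf l : String) :
    aScan dest suf l =
      match dest.findIdx? (grKey suf) with
      | some g => dest.modify g (fun gr => gr ++ [l])
      | none => dest ++ [[suf, l]] := by
  induction dest with
  | nil => simp [aScan]
  | cons gr rest ih =>
      by_cases h : PySem.List.pyGet? gr 0 = some suf
      · simp [aScan, h, List.findIdx?_cons, grKey]
      · simp only [aScan, List.findIdx?_cons, grKey, decide_eq_true_eq, if_neg h]
        cases hf : rest.findIdx? (grKey suf) <;> simp [ih, hf]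

theorem map_tail_modify (dest : List (List String)) (g : Nat) (l : String)
    (hne : forall gr, gr ∈ dest -> gr ≠ []) :
    (dest.modify g (fun gr => gr ++ [l])).map List.tail
      = (dest.map List.tail).modify g (fun b => b ++ [l]) := by
  induction dest generalizing g with
  | nil => simp
  | cons gr rest ih =>
      cases g with
      | zero =>
          have h0 : gr ≠ [] := hne gr (by simp)
          cases gr with
          | nil => exact absurd rfl h0
          | cons a t => simp
      | succ g' =>
          simp only [List.map_cons, modify_succ_cons]
          rw [ih g' (fun x hx => hne x (by simp [hx]))]

theorem findIdx?_modify_append (dest : List (List String)) (g : Nat) (l k : String)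
    (hne : forall gr, gr ∈ dest -> gr ≠ []) :
    (dest.modify g (fun gr => gr ++ [l])).findIdx? (grKey k) = dest.findIdx? (grKey k) := by
  induction dest generalizing g with
  | nil => simp
  | cons gr rest ih =>
      cases g with
      | zero =>
          have h0 : gr ≠ [] := hne gr (by simp)
          cases gr with
          | nil => exact absurd rfl h0
          | cons a t => simp [List.findIdx?_cons, grKey_cons]
      | succ g' =>
          simp only [modify_succ_cons, List.findIdx?_cons]
          rw [ih g' (fun x hx => hne x (by simp [hx]))]

theorem mem_modify_ne_nil (dest : List (List String)) (g : Nat) (l : String)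
    (hne : forall gr, gr ∈ dest -> gr ≠ []) :
    forall gr, gr ∈ dest.modify g (fun gr => gr ++ [l]) -> gr ≠ [] := by
  induction dest generalizing g with
  | nil => simp
  | cons gr rest ih =>
      cases g with
      | zero =>
          intro x hx
          rw [modify_zero_cons] at hx
          rcases List.mem_cons.mp hx with h | h
          · subst h; simp
          · exact hne x (by simp [h])
      | succ g' =>
          intro x hx
          rw [modify_succ_cons] at hx
          rcases List.mem_cons.mp hx with h | h
          · subst h; exact hne x (by simp)
          · exact ih g' (fun y hy => hne y (by simp [hy])) x h

-- modifying entry g of a map over `range n`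
theorem map_range_modify {b : Type} (n g : Nat) (hg : g < n) (f : Nat -> b) (h : b -> b) :
    ((List.range n).map f).modify g h
      = (List.range n).map (fun g' => if g' = g then h (f g') else f g') := by
  apply List.ext_getElem
  · simp
  · intro i h1 h2
    simp only [List.getElem_modify, List.getElem_map, List.getElem_range]
    by_cases h : i = g
    · subst h; simp
    · simp [h, Ne.symm h]

-- appending a label with an existing group id g < n
theorem groupsOf_append_old (P : List String) (gs : List Nat) (n g : Nat) (l : String)
    (hlen : P.length = gs.length) (hg : g < n) :
    groupsOf (P ++ [l]) (gs ++ [g]) n = (groupsOf P gs n).modify g (fun b => b ++ [l]) := by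
  unfold groupsOf
  rw [map_range_modify n g hg]
  apply List.map_congr_left
  intro g' hg'
  rw [List.zip_append (by simp [hlen])]
  by_cases h : g' = g
  · subst h; simp [List.filter_append]
  · simp [List.filter_append, h, Ne.symm h]

-- appending a label with the fresh group id n (all previous ids < n)
theorem groupsOf_append_new (P : List String) (gs : List Nat) (n : Nat) (l : String)
    (hlen : P.length = gs.length) (hlt : forall g, g ∈ gs -> g < n) :
    groupsOf (P ++ [l]) (gs ++ [n]) (n + 1) = groupsOf P gs n ++ [[l]] := by
  unfold groupsOf
  rw [List.range_succ, List.map_append, List.map_singleton]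
  congr 1
  · apply List.map_congr_left
    intro g' hg'
    have hg'n : g' ≠ n := by rintro rfl; exact absurd (List.mem_range.mp hg') (by omega)
    rw [List.zip_append (by simp [hlen])]
    simp [List.filter_append, Ne.symm hg'n]
  · rw [List.zip_append (by simp [hlen])]
    have : (P.zip gs).filter (fun p => p.2 == n) = [] := by
      rw [List.filter_eq_nil_iff]
      rintro ⟨x, g⟩ hmem
      have := hlt g (List.of_mem_zip hmem).2
      simp; omega
    simp [List.filter_append, this]

-- main loop invariant: B's (first, gid, n) state tracks A's group list
theorem loop_eq (labs : List String) :
    forall (dest : List (List String)) (first : PySem.Dict String Nat)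
      (gs : List Nat) (n : Nat) (P : List String),
    P.length = gs.length ->
    dest.map List.tail = groupsOf P gs n ->
    n = dest.length ->
    (forall g, g ∈ gs -> g < n) ->
    (forall gr, gr ∈ dest -> gr ≠ []) ->
    (forall k, first.get? k = dest.findIdx? (grKey k)) ->
    (labs.foldl aStep dest).map List.tail
      = groupsOf (P ++ labs) (labs.foldl bStep (first, gs, n)).2.1
          (labs.foldl bStep (first, gs, n)).2.2 := by
  induction labs with
  | nil => intro dest first gs n P h1 h2 _ _ _ _; simpa using h2
  | cons l rest ih =>
      intro dest first gs n P hlen h2 hn hlt hne h6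
      simp only [List.foldl_cons]
      have hP : (P ++ l :: rest) = (P ++ [l]) ++ rest := by simp
      rw [hP]
      by_cases hc : (l.toList.contains ':') = true
      · have hcm : ':' ∈ l.toList := by simpa using hc
        cases hg : first.get? (pySufAfterLastColon l) with
        | some g =>
            have hfind : dest.findIdx? (grKey (pySufAfterLastColon l)) = some g := by
              rw [← h6]; exact hg
            have hglt : g < n := by
              have := List.findIdx?_eq_some_iff_findIdx_eq.mp hfind
              omega
            have hb : bStep (first, gs, n) l = (first, gs ++ [g], n) := by
              simp [bStep, hcm, hg]
            have ha : aStep dest l = dest.modify g (fun gr => gr ++ [l]) := by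
              simp [aStep, hcm, aScan_eq, hfind]
            rw [hb, ha]
            apply ih
            · simp [hlen]
            · rw [map_tail_modify dest g l hne, h2, groupsOf_append_old P gs n g l hlen hglt]
            · simp [hn]
            · intro g' hg'
              rcases List.mem_append.mp hg' with h | h
              · exact hlt g' h
              · simp at h; omega
            · exact mem_modify_ne_nil dest g l hne
            · intro k; rw [findIdx?_modify_append dest g l k hne, h6]
        | none =>
            have hfind : dest.findIdx? (grKey (pySufAfterLastColon l)) = none := by
              rw [← h6]; exact hg
            have hb : bStep (first, gs, n) l
                = (first.insert (pySufAfterLastColon l) n, gs ++ [n], n + 1) := by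
              simp [bStep, hcm, hg]
            have ha : aStep dest l = dest ++ [[pySufAfterLastColon l, l]] := by
              simp [aStep, hcm, aScan_eq, hfind]
            rw [hb, ha]
            apply ih
            · simp [hlen]
            · rw [List.map_append, h2, groupsOf_append_new P gs n l hlen hlt]; simp
            · simp [hn]
            · intro g' hg'
              rcases List.mem_append.mp hg' with h | h
              · have := hlt g' h; omega
              · simp at h; omega
            · intro gr hgr
              rcases List.mem_append.mp hgr with h | h
              · exact hne gr h
              · simp at h; subst h; simp
            · intro k
              rw [List.findIdx?_append]
              by_cases hk : k = pySufAfterLastColon l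
              · subst hk
                simp [PySem.Dict.get?_insert_self, hfind, hn, List.findIdx?_cons, grKey_cons]
              · simp [PySem.Dict.get?_insert_of_ne, hk, Ne.symm hk, h6,
                      List.findIdx?_cons, grKey_cons]
      · have hcm : ':' ∉ l.toList := by simpa using hc
        have hb : bStep (first, gs, n) l = (first.setdefault l n, gs ++ [n], n + 1) := by
          simp [bStep, hcm]
        have ha : aStep dest l = dest ++ [[l, l]] := by simp [aStep, hcm]
        rw [hb, ha]
        apply ih
        · simp [hlen]
        · rw [List.map_append, h2, groupsOf_append_new P gs n l hlen hlt]; simp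
        · simp [hn]
        · intro g' hg'
          rcases List.mem_append.mp hg' with h | h
          · have := hlt g' h; omega
          · simp at h; omega
        · intro gr hgr
          rcases List.mem_append.mp hgr with h | h
          · exact hne gr h
          · simp at h; subst h; simp
        · intro k
          rw [List.findIdx?_append]
          by_cases hk : k = l
          · subst hk
            cases hgk : first.get? k with
            | some i =>
                have hfd : dest.findIdx? (grKey k) = some i := by rw [← h6]; exact hgk
                simp [PySem.Dict.get?_setdefault_self, hgk, hfd]
            | none =>
                have hfd : dest.findIdx? (grKey k) = none := by rw [← h6]; exact hgk
                simp [PySem.Dict.get?_setdefault_self, hgk, hfd, hn,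
                      List.findIdx?_cons, grKey_cons]
          · simp [PySem.Dict.get?_setdefault_of_ne, hk, Ne.symm hk, h6,
                  List.findIdx?_cons, grKey_cons]

-- ===== counting-sort correctness (pass 2 of B) =====

-- the labels of group g, and the size of group g, in a (label, group-id) pairing
def Fg (Q : List (String × Nat)) (g : Nat) : List String :=
  (Q.filter (fun p => p.2 == g)).map Prod.fst

def cnt (Q : List (String × Nat)) (g : Nat) : Nat := Q.countP (fun p => p.2 == g)

-- the picture of B's output array mid-placement: group g's slots hold the already placed
-- labels of g, the rest still the '' filler
def segs (full Q : List (String × Nat)) (n : Nat) : List (List String) :=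
  (List.range n).map (fun g => Fg Q g ++ List.replicate (cnt full g - cnt Q g) "")

def startOf (full : List (String × Nat)) (g : Nat) : Nat :=
  ((List.range g).map (cnt full)).sum

theorem length_Fg (Q : List (String × Nat)) (g : Nat) : (Fg Q g).length = cnt Q g := by
  simp only [Fg, cnt, List.length_map]
  exact Eq.symm List.countP_eq_length_filter

theorem Fg_append (Q : List (String × Nat)) (l : String) (k g : Nat) :
    Fg (Q ++ [(l, k)]) g = if g = k then Fg Q g ++ [l] else Fg Q g := by
  by_cases h : g = k
  · subst h; simp [Fg, List.filter_append]
  · simp [Fg, List.filter_append, h, Ne.symm h]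

theorem cnt_append (Q : List (String × Nat)) (l : String) (k g : Nat) :
    cnt (Q ++ [(l, k)]) g = if g = k then cnt Q g + 1 else cnt Q g := by
  by_cases h : g = k
  · subst h; simp [cnt, List.countP_append]
  · simp [cnt, List.countP_append, h, Ne.symm h]

theorem cnt_prefix_le (Q R : List (String × Nat)) (g : Nat) :
    cnt Q g ≤ cnt (Q ++ R) g := by
  simp [cnt, List.countP_append]

theorem sum_indicator (n k : Nat) (hk : k < n) :
    ((List.range n).map (fun g => if k = g then 1 else 0)).sum = 1 := by
  induction n with
  | zero => omega
  | succ m ih =>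
      rw [List.range_succ]
      by_cases h : k = m
      · subst h
        have : ((List.range k).map (fun g => if k = g then 1 else 0)).sum = 0 := by
          rw [List.sum_eq_zero_iff]
          intro x hx
          simp only [List.mem_map, List.mem_range] at hx
          obtain ⟨g, hg, rfl⟩ := hx
          simp [Nat.ne_of_gt hg]
        simp [this]
      · have hk' : k < m := by omega
        simp [ih hk', h]

theorem sum_cnt (n : Nat) (Q : List (String × Nat)) (h : ∀ p ∈ Q, p.2 < n) :
    ((List.range n).map (cnt Q)).sum = Q.length := by
  induction Q with
  | nil =>
      rw [List.map_congr_left (fun g _ => by simp [cnt] :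
        ∀ g ∈ List.range n, cnt [] g = (fun _ => 0) g)]
      simp
  | cons p t ih =>
      have hmap : (List.range n).map (cnt (p :: t))
          = (List.range n).map (fun g => cnt t g + if p.2 = g then 1 else 0) := by
        apply List.map_congr_left
        intro g _
        by_cases hp : p.2 = g <;> simp [cnt, hp]
      rw [hmap, List.sum_map_add]
      have h2 : ((List.range n).map (fun g => if p.2 = g then 1 else 0)).sum = 1 :=
        sum_indicator n p.2 (h p (by simp))
      have h1 : ((List.range n).map (cnt t)).sum = t.length :=
        ih (fun q hq => h q (by simp [hq]))
      simp only [List.length_cons]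
      omega

theorem flatten_replicates (cs : List Nat) :
    (cs.map (fun c => List.replicate c "")).flatten = List.replicate cs.sum "" := by
  induction cs with
  | nil => rfl
  | cons c t ih =>
      simp only [List.map_cons, List.flatten_cons, ih, List.sum_cons, List.replicate_add]

theorem flatten_set (sg : List (List String)) :
    ∀ (k : Nat) (hk : k < sg.length) (i : Nat), i < sg[k].length → ∀ (a : String),
    sg.flatten.set (((sg.take k).map List.length).sum + i) a
      = (sg.modify k (fun s => s.set i a)).flatten := by
  induction sg with
  | nil => intro k hk; simp at hk
  | cons s rest ih =>
      intro k hk i hi a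
      cases k with
      | zero =>
          simp only [List.take_zero, List.map_nil, List.sum_nil, Nat.zero_add,
            List.flatten_cons, modify_zero_cons]
          rw [List.set_append_left _ _ (by simpa using hi)]
      | succ k' =>
          simp only [List.take_succ_cons, List.map_cons, List.sum_cons, List.flatten_cons,
            modify_succ_cons]
          rw [Nat.add_assoc, List.set_append, if_neg (by omega), Nat.add_sub_cancel_left]
          rw [ih k' (by simpa using hk) i (by simpa using hi) a]

theorem take_map_range {b : Type} (n k : Nat) (hk : k ≤ n) (f : Nat → b) :
    ((List.range n).map f).take k = (List.range k).map f := by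
  rw [← List.map_take, List.take_range, Nat.min_eq_left hk]

theorem seg_length (full Q : List (String × Nat)) (g : Nat) (hle : cnt Q g ≤ cnt full g) :
    (Fg Q g ++ List.replicate (cnt full g - cnt Q g) "").length = cnt full g := by
  simp [length_Fg]; omega

theorem segs_take_lengths (full Q : List (String × Nat)) (n k : Nat) (hk : k ≤ n)
    (hle : ∀ g, cnt Q g ≤ cnt full g) :
    (((segs full Q n).take k).map List.length).sum = startOf full k := by
  unfold segs startOf
  rw [take_map_range n k hk, List.map_map]
  congr 1
  apply List.map_congr_left
  intro g _
  simpa using seg_length full Q g (hle g)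

-- the pos/s loop is the prefix-sum table of its input
theorem posFold (cs : List Nat) :
    ∀ (p0 : List Nat) (s0 : Nat),
    cs.foldl (fun st c => (st.1 ++ [st.2], st.2 + c)) (p0, s0)
      = (p0 ++ (List.range cs.length).map (fun i => s0 + (cs.take i).sum), s0 + cs.sum) := by
  induction cs with
  | nil => intro p0 s0; simp
  | cons c t ih =>
      intro p0 s0
      simp only [List.foldl_cons, ih, Prod.mk.injEq]
      constructor
      · rw [List.append_assoc]
        congr 1
        rw [List.length_cons, List.range_succ_eq_map, List.map_cons, List.map_map]
        simp [Function.comp, Nat.add_assoc]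
      · simp [Nat.add_assoc]

-- the count loop is the per-group tally table of its input
theorem countFold (gs : List Nat) (n : Nat) :
    ∀ (f : Nat → Nat), (∀ k ∈ gs, k < n) →
    gs.foldl (fun c k => c.modify k (fun v => v + 1)) ((List.range n).map f)
      = (List.range n).map (fun g => f g + gs.count g) := by
  induction gs with
  | nil => intro f _; simp
  | cons k t ih =>
      intro f h
      simp only [List.foldl_cons]
      rw [map_range_modify n k (h k (by simp)) f (fun v => v + 1)]
      rw [ih (fun g' => if g' = k then f g' + 1 else f g') (fun x hx => h x (by simp [hx]))]
      apply List.map_congr_left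
      intro g _
      by_cases hg : g = k
      · subst hg; simp; omega
      · simp [hg, Ne.symm hg]

theorem count_eq_cnt (labs : List String) (gs : List Nat) (g : Nat)
    (hlen : labs.length = gs.length) :
    gs.count g = cnt (labs.zip gs) g := by
  have hz : (labs.zip gs).map Prod.snd = gs := List.map_snd_zip (by omega)
  have h1 : cnt (labs.zip gs) g = ((labs.zip gs).map Prod.snd).countP (fun x => x == g) := by
    rw [List.countP_map]; rfl
  rw [h1, hz, List.count_eq_countP]

-- the placement loop: every step moves one label from the pending side into its group's
-- next free slot of the output picture
theorem place_eq (n : Nat) (full : List (String × Nat)) (hfull : ∀ p ∈ full, p.2 < n)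
    (R : List (String × Nat)) :
    ∀ (Q : List (String × Nat)) (out : List String) (pos : List Nat),
    full = Q ++ R →
    out = (segs full Q n).flatten →
    pos = (List.range n).map (fun g => startOf full g + cnt Q g) →
    (R.foldl (fun st p => (st.1.set (st.2.getD p.2 0) p.1, st.2.modify p.2 (fun v => v + 1)))
      (out, pos)).1 = (segs full full n).flatten := by
  induction R with
  | nil =>
      intro Q out pos hQ hout _
      subst hout
      simp [hQ]
  | cons p R' ih =>
      intro Q out pos hQ hout hpos
      obtain ⟨l, k⟩ := p
      have hk : k < n := hfull (l, k) (by rw [hQ]; simp)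
      have hle : ∀ g, cnt Q g ≤ cnt full g := fun g => by
        rw [hQ]; exact cnt_prefix_le Q ((l, k) :: R') g
      have hlt : cnt Q k < cnt full k := by
        rw [hQ, cnt, cnt, List.countP_append, List.countP_cons]
        simp
      have hQ' : full = (Q ++ [(l, k)]) ++ R' := by rw [hQ]; simp
      simp only [List.foldl_cons]
      apply ih (Q ++ [(l, k)]) _ _ hQ'
      · -- the written output is the picture of the extended prefix
        have hkpos : pos.getD k 0 = startOf full k + cnt Q k := by
          rw [hpos, List.getD_eq_getElem _ _ (by simpa using hk)]
          simp
        have hklen : k < (segs full Q n).length := by simp [segs, hk]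
        have hilen : cnt Q k < (segs full Q n)[k].length := by
          simp only [segs, List.getElem_map, List.getElem_range]
          rw [seg_length full Q k (hle k)]
          exact hlt
        have hset := flatten_set (segs full Q n) k hklen (cnt Q k) hilen l
        rw [segs_take_lengths full Q n k (Nat.le_of_lt hk) hle] at hset
        rw [hout, hkpos, hset]
        congr 1
        unfold segs
        rw [map_range_modify n k hk]
        apply List.map_congr_left
        intro g _
        by_cases hg : g = k
        · subst hg
          rw [if_pos rfl, List.set_append, if_neg (by rw [length_Fg]; omega), length_Fg,
              Nat.sub_self]
          have hrep : cnt full g - cnt Q g = 1 + (cnt full g - (cnt Q g + 1)) := by omega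
          rw [hrep, List.replicate_add, List.replicate_one]
          simp [Fg_append, cnt_append]
        · simp [Fg_append, cnt_append, hg]
      · -- the bumped pos table is the start+done table of the extended prefix
        rw [hpos, map_range_modify n k hk]
        apply List.map_congr_left
        intro g _
        by_cases hg : g = k
        · subst hg; simp [cnt_append]; omega
        · simp [cnt_append, hg]

-- pass 1 keeps every assigned id below the group counter and assigns one id per label
theorem bStep_inv (labs : List String) :
    ∀ (first : PySem.Dict String Nat) (gs : List Nat) (n : Nat),
    (∀ g ∈ gs, g < n) →
    (∀ k g, first.get? k = some g → g < n) →
    (labs.foldl bStep (first, gs, n)).2.1.length = gs.length + labs.length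
      ∧ (∀ g ∈ (labs.foldl bStep (first, gs, n)).2.1, g < (labs.foldl bStep (first, gs, n)).2.2) := by
  induction labs with
  | nil => intro first gs n h1 _; simpa using h1
  | cons l rest ih =>
      intro first gs n h1 h2
      simp only [List.foldl_cons]
      by_cases hc : (l.toList.contains ':') = true
      · have hcm : ':' ∈ l.toList := by simpa using hc
        cases hg : first.get? (pySufAfterLastColon l) with
        | some g =>
            have hb : bStep (first, gs, n) l = (first, gs ++ [g], n) := by
              simp [bStep, hcm, hg]
            rw [hb]
            have := ih first (gs ++ [g]) n
              (by intro x hx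
                  rcases List.mem_append.mp hx with h | h
                  · exact h1 x h
                  · simp at h; subst h; exact h2 _ _ hg)
              h2
            constructor
            · rw [this.1]; simp; omega
            · exact this.2
        | none =>
            have hb : bStep (first, gs, n) l
                = (first.insert (pySufAfterLastColon l) n, gs ++ [n], n + 1) := by
              simp [bStep, hcm, hg]
            rw [hb]
            have := ih (first.insert (pySufAfterLastColon l) n) (gs ++ [n]) (n + 1)
              (by intro x hx
                  rcases List.mem_append.mp hx with h | h
                  · have := h1 x h; omega
                  · simp at h; omega)
              (by intro k g hkg
                  by_cases hk : k = pySufAfterLastColon l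
                  · subst hk
                    rw [PySem.Dict.get?_insert_self] at hkg
                    simp at hkg; omega
                  · rw [show (first.insert (pySufAfterLastColon l) n).get? k = first.get? k by
                        simp [PySem.Dict.get?_insert_of_ne, hk]] at hkg
                    have := h2 k g hkg; omega)
            constructor
            · rw [this.1]; simp; omega
            · exact this.2
      · have hcm : ':' ∉ l.toList := by simpa using hc
        have hb : bStep (first, gs, n) l = (first.setdefault l n, gs ++ [n], n + 1) := by
          simp [bStep, hcm]
        rw [hb]
        have := ih (first.setdefault l n) (gs ++ [n]) (n + 1)
          (by intro x hx
              rcases List.mem_append.mp hx with h | h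
              · have := h1 x h; omega
              · simp at h; omega)
          (by intro k g hkg
              by_cases hk : k = l
              · subst hk
                rw [PySem.Dict.get?_setdefault_self] at hkg
                cases hgk : first.get? k with
                | some v => rw [hgk] at hkg; simp at hkg; subst hkg; have := h2 k v hgk; omega
                | none => rw [hgk] at hkg; simp at hkg; omega
              · rw [show (first.setdefault l n).get? k = first.get? k by
                    simp [PySem.Dict.get?_setdefault_of_ne, hk]] at hkg
                have := h2 k g hkg; omega)
        constructor
        · rw [this.1]; simp; omega
        · exact this.2

-- pass 2 as a whole: the counting sort of (labs, gid) is the groups flattened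
theorem counting_eq (labs : List String) (gs : List Nat) (n : Nat)
    (hlen : labs.length = gs.length) (hlt : ∀ g ∈ gs, g < n) :
    (((labs.zip gs).foldl
        (fun st p => (st.1.set (st.2.getD p.2 0) p.1, st.2.modify p.2 (fun v => v + 1)))
        (List.replicate labs.length "",
          ((gs.foldl (fun c k => c.modify k (fun v => v + 1)) (List.replicate n 0)).foldl
            (fun st c => (st.1 ++ [st.2], st.2 + c)) (([] : List Nat), 0)).1)).1)
      = (List.range n).flatMap (fun g => Fg (labs.zip gs) g) := by
  have hfull : ∀ p ∈ labs.zip gs, p.2 < n := fun p hp => hlt p.2 (List.of_mem_zip hp).2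
  have hrepl : (List.replicate n 0 : List Nat) = (List.range n).map (fun _ => 0) := by
    symm
    rw [List.eq_replicate_iff]
    refine ⟨by simp, by simp⟩
  have hcount : gs.foldl (fun c k => c.modify k (fun v => v + 1)) (List.replicate n 0)
      = (List.range n).map (fun g => cnt (labs.zip gs) g) := by
    rw [hrepl, countFold gs n (fun _ => 0) hlt]
    apply List.map_congr_left
    intro g _
    rw [Nat.zero_add, count_eq_cnt labs gs g hlen]
  have hpos : (((List.range n).map (fun g => cnt (labs.zip gs) g)).foldl
      (fun st c => (st.1 ++ [st.2], st.2 + c)) (([] : List Nat), 0)).1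
      = (List.range n).map (fun g => startOf (labs.zip gs) g + cnt ([] : List (String × Nat)) g) := by
    rw [posFold]
    simp only [List.nil_append, List.length_map, List.length_range]
    apply List.map_congr_left
    intro g hg
    rw [take_map_range n g (Nat.le_of_lt (List.mem_range.mp hg))]
    simp [startOf, cnt]
    rfl
  have hout : (List.replicate labs.length "" : List String)
      = (segs (labs.zip gs) [] n).flatten := by
    unfold segs
    have : (List.range n).map (fun g => Fg ([] : List (String × Nat)) g
        ++ List.replicate (cnt (labs.zip gs) g - cnt ([] : List (String × Nat)) g) "")
        = ((List.range n).map (fun g => cnt (labs.zip gs) g)).map (fun c => List.replicate c "") := by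
      rw [List.map_map]
      apply List.map_congr_left
      intro g _
      simp [Fg, cnt]
    rw [this, flatten_replicates]
    have hsum : ((List.range n).map (fun g => cnt (labs.zip gs) g)).sum = labs.length := by
      rw [show (List.range n).map (fun g => cnt (labs.zip gs) g)
            = (List.range n).map (cnt (labs.zip gs)) from rfl,
          sum_cnt n _ hfull, List.length_zip]
      omega
    rw [hsum]
  rw [hcount, hpos, hout]
  rw [place_eq n (labs.zip gs) hfull (labs.zip gs) [] _ _ (by simp) rfl rfl]
  unfold segs
  simp [List.flatMap_def]

-- ===== VERDICT (by name: the statement is the Claim_ definition above) =====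
theorem sortlabels_spec : Claim_equal_sortlabels := by
  intro labs _
  unfold Spec_sortlabels sortlabels sortlabels_alt
  have hinv := bStep_inv labs PySem.Dict.empty [] 0 (by simp) (by simp)
  have hlen : labs.length = (labs.foldl bStep (PySem.Dict.empty, [], 0)).2.1.length := by
    rw [hinv.1]; simp
  have h := loop_eq labs [] PySem.Dict.empty [] 0 []
    (by simp) (by simp [groupsOf]) (by simp) (by simp) (by simp) (by simp)
  simp only [List.nil_append] at h
  rw [show (labs.foldl aStep []).flatMap (fun gr => PySem.List.slice gr (some 1) none)
        = ((labs.foldl aStep []).map List.tail).flatten by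
      simp [PySem.List.slice_from_one, List.flatMap_def]]
  rw [h]
  rw [counting_eq labs (labs.foldl bStep (PySem.Dict.empty, [], 0)).2.1
        (labs.foldl bStep (PySem.Dict.empty, [], 0)).2.2 hlen hinv.2]
  simp [groupsOf, Fg, List.flatMap_def]
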